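-- pv_equiv track=rewrite | github.com/Yawn-Sean/Daily_CF_Problems | daily_problems/2024/08/0830/personal_submission/cf768b_hum.py | f
-- ===== SOURCE A (Python) =====
-- def f(x, k):
--   if x == 0:
--     return 0
--   l = x.bit_length() - 1
--   length = 1 << l
--   if k > length:
--     return f(x >> 1, k - length)
--   elif k < length:
--     return f(x >> 1, k)
--   return x % 2
-- ===== SOURCE B (Python) =====
-- # Closed form: for x > 0 and 1 <= k < 2**x.bit_length(), the k-th element is bit
-- # (bit_length-1 - v2(k)) of x; any other k gives 0.
-- def f(x, k):
--     if x == 0: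
--         return 0
--     bl = x.bit_length()
--     if k <= 0 or k >= 1 << bl:
--         return 0
--     t = (k & -k).bit_length() - 1
--     return (x >> (bl - 1 - t)) % 2
-- ===== Notes on version B (the rewrite author's own statement) =====
-- stated objective: simpler
-- what changed: Replaced the recursive halving descent by a closed form: for x>0 and 1<=k<2**x.bit_length() the answer is bit (bit_length-1 - v2(k)) of x, and 0 for any out-of-range k.
-- outside the precondition, e.g. on f(-1, 5): A returns 1, B returns 0; on f(-1, 0): A raises RecursionError, B returns 0
import Mathlib
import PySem

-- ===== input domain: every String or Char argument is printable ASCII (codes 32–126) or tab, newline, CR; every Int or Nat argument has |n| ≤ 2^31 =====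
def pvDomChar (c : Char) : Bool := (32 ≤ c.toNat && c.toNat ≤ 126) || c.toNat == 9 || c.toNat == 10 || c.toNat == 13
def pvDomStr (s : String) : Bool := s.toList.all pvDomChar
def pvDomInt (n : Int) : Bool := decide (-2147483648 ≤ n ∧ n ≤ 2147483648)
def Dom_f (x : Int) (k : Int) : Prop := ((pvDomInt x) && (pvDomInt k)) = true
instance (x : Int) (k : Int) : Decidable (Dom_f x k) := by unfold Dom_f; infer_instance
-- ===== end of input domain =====

-- B replaces A's recursive halving descent by the closed form "bit (bit_length-1 - v2(k)) of x"
-- (0 for out-of-range k); equivalence is claimed for the return value on x ≥ 0.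

-- ===== PORT A =====
-- A's recursion does not terminate for negative x (Python raises RecursionError there);
-- the fuel x.natAbs + 1 strictly bounds the recursion depth on all of Pre_f (x ≥ 0),
-- so on Pre_f the port computes exactly A's recursion.
def fA : Nat → Int → Int → Int
  | 0, _, _ => 0          -- fuel exhausted: unreachable for x ≥ 0
  | fuel + 1, x, k =>
    if x = 0 then 0
    else
      let l : Nat := PySem.Int.bitLength x - 1      -- l = x.bit_length() - 1 (≥ 0 since x ≠ 0)
      let length : Int := 2 ^ l                     -- length = 1 << l
      if length < k then fA fuel (PySem.Int.floordiv x 2) (k - length)   -- x >> 1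
      else if k < length then fA fuel (PySem.Int.floordiv x 2) k
      else PySem.Int.mod x 2

def f (x : Int) (k : Int) : Int := fA (x.natAbs + 1) x k

-- ===== PORT B =====
-- ntz n = number of trailing zero bits of n; ports Source B's "(k & -k).bit_length() - 1",
-- exact for the k > 0 on which Source B evaluates it.
def ntz (n : Nat) : Nat :=
  if n = 0 then 0 else if n % 2 = 1 then 0 else ntz (n / 2) + 1
decreasing_by exact Nat.div_lt_self (by omega) (by omega)

def f_alt (x : Int) (k : Int) : Int :=
  if x = 0 then 0
  else
    let bl : Nat := PySem.Int.bitLength x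
    if k ≤ 0 ∨ (2 : Int) ^ bl ≤ k then 0            -- k <= 0 or k >= 1 << bl
    else
      let t : Nat := ntz k.toNat                    -- (k & -k).bit_length() - 1
      PySem.Int.mod (PySem.Int.floordiv x (2 ^ (bl - 1 - t))) 2   -- (x >> (bl-1-t)) % 2

-- ===== PRECONDITION & SPEC =====
-- Pre_f excludes negative x: there A's arithmetic-shift recursion never reaches the base
-- case (-1 is a fixpoint of x >> 1), so Python A raises RecursionError for k ≤ 0 and for
-- large k, and the values it returns for the remaining k are artifacts of that fixpoint.
def Pre_f (x : Int) (k : Int) : Prop := 0 ≤ x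
instance (x : Int) (k : Int) : Decidable (Pre_f x k) := by unfold Pre_f; infer_instance
def pvWitness_f : Int × Int := (6, 3)

def Spec_f (x : Int) (k : Int) (out : Int) : Prop := out = f_alt x k
instance (x : Int) (k : Int) (out : Int) : Decidable (Spec_f x k out) := by unfold Spec_f; infer_instance

-- ===== CLAIM (what is proved, stated in full; the proofs are below) =====
def Claim_equal_f : Prop := ∀ (x : Int) (k : Int), Dom_f x k → Pre_f x k → Spec_f x k (f x k)

-- ===== LEMMAS AND PROOFS =====

-- f_alt with its let-bindings reduced
theorem f_alt_def (x k : Int) : f_alt x k =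
    if x = 0 then 0
    else if k ≤ 0 ∨ (2 : Int) ^ (PySem.Int.bitLength x) ≤ k then 0
    else PySem.Int.mod
      (PySem.Int.floordiv x (2 ^ (PySem.Int.bitLength x - 1 - ntz k.toNat))) 2 := rfl

theorem ntz_pow (L : Nat) : ntz (2 ^ L) = L := by
  induction L with
  | zero => simp [ntz]
  | succ L ih =>
      rw [ntz]
      have h1 : ¬ (2 ^ (L + 1) = 0) := by positivity
      have h2 : 2 ^ (L + 1) % 2 = 0 := by
        simp [pow_succ, Nat.mul_mod_left]
      have h3 : 2 ^ (L + 1) / 2 = 2 ^ L := by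
        rw [pow_succ]; exact Nat.mul_div_cancel _ (by omega)
      simp [h1, h2, h3, ih]

theorem ntz_add_pow : ∀ (L r : Nat), 0 < r → r < 2 ^ L → ntz (2 ^ L + r) = ntz r := by
  intro L
  induction L with
  | zero => intro r h0 h1; omega
  | succ L ih =>
      intro r h0 h1
      conv_lhs => rw [ntz]
      have hne : ¬ (2 ^ (L + 1) + r = 0) := by positivity
      have hm : (2 ^ (L + 1) + r) % 2 = r % 2 := by omega
      have hr : ¬ r = 0 := by omega
      by_cases hodd : r % 2 = 1
      · rw [if_neg hne, if_pos (show (2 ^ (L + 1) + r) % 2 = 1 by omega)]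
        conv_rhs => rw [ntz]
        rw [if_neg hr, if_pos hodd]
      · have hre : r % 2 = 0 := by omega
        have hd : (2 ^ (L + 1) + r) / 2 = 2 ^ L + r / 2 := by omega
        have h0' : 0 < r / 2 := by omega
        have h1' : r / 2 < 2 ^ L := by
          have : 2 ^ (L + 1) = 2 * 2 ^ L := by ring
          omega
        rw [if_neg hne, if_neg (show ¬ (2 ^ (L + 1) + r) % 2 = 1 by omega), hd,
            ih (r / 2) h0' h1']
        conv_rhs => rw [ntz]
        rw [if_neg hr, if_neg hodd]

theorem two_pow_ntz_le (n : Nat) (h : 0 < n) : 2 ^ ntz n ≤ n := by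
  induction n using Nat.strong_induction_on with
  | _ n ih =>
      rw [ntz]
      have hne : ¬ n = 0 := by omega
      by_cases hodd : n % 2 = 1
      · simp [hne, hodd]; omega
      · have h2 : 0 < n / 2 := by omega
        have := ih (n / 2) (by omega) h2
        simp only [hne, if_false, hodd, if_false, pow_succ]
        omega

theorem ntz_lt (r L : Nat) (h0 : 0 < r) (h1 : r < 2 ^ L) : ntz r < L := by
  have h2 := two_pow_ntz_le r h0
  have h3 : (2 : Nat) ^ ntz r < 2 ^ L := lt_of_le_of_lt h2 h1
  exact (Nat.pow_lt_pow_iff_right (by omega)).mp h3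

-- bitLength is positive on positive ints
theorem bitLength_pos (x : Int) (hx : 0 < x) : 0 < PySem.Int.bitLength x := by
  by_contra h
  have h0 : PySem.Int.bitLength x = 0 := by omega
  have := PySem.Int.lt_two_pow_bitLength x
  rw [h0] at this
  simp at this
  omega

-- floordiv by a positive power of two, on a nonnegative int, as Nat division
theorem floordiv_pow_natCast (m s : Nat) :
    PySem.Int.floordiv (m : Int) ((2 : Int) ^ s) = ((m / 2 ^ s : Nat) : Int) := by
  have h := PySem.Int.floordiv_natCast m (2 ^ s)
  have h2 : (((2 ^ s : Nat) : Int)) = (2 : Int) ^ s := by push_cast; ring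
  rw [← h2]; exact h

theorem floordiv_two_natCast (m : Nat) :
    PySem.Int.floordiv (m : Int) 2 = ((m / 2 : Nat) : Int) := by
  have := floordiv_pow_natCast m 1
  simpa using this

-- 2 is ≤ any 2^L with L ≥ 1
theorem two_le_two_pow (L : Nat) (h : 0 < L) : (2 : Nat) ≤ 2 ^ L :=
  le_trans (by norm_num) (Nat.pow_le_pow_right (by omega) h)

-- f_alt on the halved x, right-descent case
theorem f_alt_step_right (x k : Int) (hx : 0 < x)
    (hk : (2 : Int) ^ (PySem.Int.bitLength x - 1) < k) :
    f_alt x k = f_alt (PySem.Int.floordiv x 2) (k - 2 ^ (PySem.Int.bitLength x - 1)) := by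
  have hbl := bitLength_pos x hx
  set bl := PySem.Int.bitLength x with hbldef
  set L := bl - 1 with hLdef
  have hblL : bl = L + 1 := by omega
  have hxne : x ≠ 0 := by omega
  have hxeq : x = ((x.toNat : Nat) : Int) := by omega
  have hx2 : PySem.Int.floordiv x 2 = ((x.toNat / 2 : Nat) : Int) := by
    rw [hxeq]; exact floordiv_two_natCast x.toNat
  have hbl' : PySem.Int.bitLength (PySem.Int.floordiv x 2) = L := by
    have := PySem.Int.bitLength_of_pos hx
    omega
  have hppos : (0 : Int) < 2 ^ L := by positivity
  have hkpos : ¬ k ≤ 0 := by omega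
  have hblsplit : (2 : Int) ^ bl = 2 ^ L * 2 := by rw [hblL]; ring
  by_cases hbig : (2 : Int) ^ bl ≤ k
  · -- both sides are 0
    rw [f_alt_def, if_neg hxne, if_pos (Or.inr hbig)]
    rw [f_alt_def]
    by_cases hz : PySem.Int.floordiv x 2 = 0
    · rw [if_pos hz]
    · rw [if_neg hz, if_pos (Or.inr ?_)]
      rw [hbl']
      omega
  · -- in-range k: 2^L < k < 2^(L+1)
    push_neg at hbig
    have hxge : (2 : Int) ^ L ≤ x := by
      have h := PySem.Int.two_pow_bitLength_le x hxne
      have hna : x.natAbs = x.toNat := by omega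
      rw [hna, ← hLdef] at h
      have : ((2 ^ L : Nat) : Int) ≤ ((x.toNat : Nat) : Int) := by exact_mod_cast h
      push_cast at this
      omega
    have hLpos : 0 < L := by
      by_contra hL0
      have hL0' : L = 0 := by omega
      rw [hL0'] at hk
      rw [hblL, hL0'] at hbig
      norm_num at hk hbig
      omega
    have hxtge : 2 ^ L ≤ x.toNat := by
      have : ((2 ^ L : Nat) : Int) = (2 : Int) ^ L := by push_cast; ring
      omega
    have hz : PySem.Int.floordiv x 2 ≠ 0 := by
      rw [hx2]
      have h2L := two_le_two_pow L hLpos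
      have : 1 ≤ x.toNat / 2 := by omega
      omega
    -- nat picture of k and k' = k - 2^L
    have hpc : ((2 ^ L : Nat) : Int) = (2 : Int) ^ L := by push_cast; ring
    have he : k.toNat = 2 ^ L + (k - 2 ^ L).toNat := by omega
    have hpos' : 0 < (k - 2 ^ L).toNat := by omega
    have hlt' : (k - 2 ^ L).toNat < 2 ^ L := by omega
    have hnt : ntz k.toNat = ntz (k - 2 ^ L).toNat := by
      rw [he]; exact ntz_add_pow L _ hpos' hlt'
    have htlt : ntz (k - 2 ^ L).toNat < L := ntz_lt _ L hpos' hlt'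
    -- both take the value branch
    rw [f_alt_def, if_neg hxne, if_neg (by push_neg; rw [← hbldef]; exact ⟨by omega, hbig⟩)]
    rw [f_alt_def, if_neg hz, if_neg (by push_neg; rw [hbl']; constructor <;> omega)]
    rw [hbl', ← hbldef, hnt]
    set t := ntz (k - 2 ^ L).toNat with htdef
    have hsx : bl - 1 - t = (L - 1 - t) + 1 := by omega
    rw [hsx]
    conv_lhs => rw [hxeq, floordiv_pow_natCast]
    rw [hx2, floordiv_pow_natCast]
    rw [Nat.div_div_eq_div_mul, ← pow_succ']

-- f_alt on the halved x, left-descent case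
theorem f_alt_step_left (x k : Int) (hx : 0 < x)
    (hk : k < (2 : Int) ^ (PySem.Int.bitLength x - 1)) :
    f_alt x k = f_alt (PySem.Int.floordiv x 2) k := by
  have hbl := bitLength_pos x hx
  set bl := PySem.Int.bitLength x with hbldef
  set L := bl - 1 with hLdef
  have hblL : bl = L + 1 := by omega
  have hxne : x ≠ 0 := by omega
  have hxeq : x = ((x.toNat : Nat) : Int) := by omega
  have hx2 : PySem.Int.floordiv x 2 = ((x.toNat / 2 : Nat) : Int) := by
    rw [hxeq]; exact floordiv_two_natCast x.toNat
  have hbl' : PySem.Int.bitLength (PySem.Int.floordiv x 2) = L := by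
    have := PySem.Int.bitLength_of_pos hx
    omega
  by_cases hk0 : k ≤ 0
  · rw [f_alt_def, if_neg hxne, if_pos (Or.inl hk0)]
    rw [f_alt_def]
    by_cases hz : PySem.Int.floordiv x 2 = 0
    · rw [if_pos hz]
    · rw [if_neg hz, if_pos (Or.inl hk0)]
  · push_neg at hk0
    have hpc : ((2 ^ L : Nat) : Int) = (2 : Int) ^ L := by push_cast; ring
    have hLpos : 0 < L := by
      by_contra hL0
      have : L = 0 := by omega
      rw [this] at hk
      norm_num at hk
      omega
    have hxge : (2 : Int) ^ L ≤ x := by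
      have h := PySem.Int.two_pow_bitLength_le x hxne
      have hna : x.natAbs = x.toNat := by omega
      rw [hna, ← hLdef] at h
      have : ((2 ^ L : Nat) : Int) ≤ ((x.toNat : Nat) : Int) := by exact_mod_cast h
      omega
    have hxtge : 2 ^ L ≤ x.toNat := by omega
    have hz : PySem.Int.floordiv x 2 ≠ 0 := by
      rw [hx2]
      have h2L := two_le_two_pow L hLpos
      have : 1 ≤ x.toNat / 2 := by omega
      omega
    have hkn0 : 0 < k.toNat := by omega
    have hknlt : k.toNat < 2 ^ L := by omega
    have htlt : ntz k.toNat < L := ntz_lt _ L hkn0 hknlt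
    have hnbig : ¬ ((2 : Int) ^ bl ≤ k) := by
      have : (2 : Int) ^ bl = 2 ^ L * 2 := by rw [hblL]; ring
      omega
    rw [f_alt_def, if_neg hxne, if_neg (by push_neg; rw [← hbldef]; exact ⟨by omega, by omega⟩)]
    rw [f_alt_def, if_neg hz, if_neg (by push_neg; rw [hbl']; constructor <;> omega)]
    rw [hbl', ← hbldef]
    set t := ntz k.toNat with htdef
    have hsx : bl - 1 - t = (L - 1 - t) + 1 := by omega
    rw [hsx]
    conv_lhs => rw [hxeq, floordiv_pow_natCast]
    rw [hx2, floordiv_pow_natCast]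
    rw [Nat.div_div_eq_div_mul, ← pow_succ']

-- the middle case: k = 2^(bl-1) gives x % 2
theorem f_alt_mid (x : Int) (hx : 0 < x) :
    f_alt x ((2 : Int) ^ (PySem.Int.bitLength x - 1)) = PySem.Int.mod x 2 := by
  have hbl := bitLength_pos x hx
  set bl := PySem.Int.bitLength x with hbldef
  set L := bl - 1 with hLdef
  have hxne : x ≠ 0 := by omega
  have hppos : (0 : Int) < 2 ^ L := by positivity
  have hnbig : ¬ ((2 : Int) ^ bl ≤ (2 : Int) ^ L) := by
    have : (2 : Int) ^ bl = 2 ^ L * 2 := by rw [(by omega : bl = L + 1)]; ring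
    omega
  have hp : ((2 : Int) ^ L).toNat = 2 ^ L := by
    have : ((2 ^ L : Nat) : Int) = (2 : Int) ^ L := by push_cast; ring
    omega
  have hnt : ntz ((2 : Int) ^ L).toNat = L := by rw [hp]; exact ntz_pow L
  rw [f_alt_def, if_neg hxne, if_neg (by push_neg; rw [← hbldef]; exact ⟨by omega, by omega⟩)]
  rw [← hbldef, hnt]
  have hs : bl - 1 - L = 0 := by omega
  rw [hs, pow_zero]
  rw [PySem.Int.floordiv_eq_ediv_of_pos (by norm_num)]
  norm_num

-- the main fuel lemma: on nonnegative x with enough fuel, A's recursion equals B's closed form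
theorem fA_eq : ∀ (fuel : Nat) (x k : Int), 0 ≤ x → x.natAbs < fuel → fA fuel x k = f_alt x k := by
  intro fuel
  induction fuel with
  | zero => intro x k _ h; omega
  | succ fuel ih =>
      intro x k hx hf
      rw [fA]
      by_cases hx0 : x = 0
      · rw [if_pos hx0, f_alt_def, if_pos hx0]
      · have hxpos : 0 < x := by omega
        have hbl := bitLength_pos x hxpos
        rw [if_neg hx0]
        set L := PySem.Int.bitLength x - 1 with hLdef
        have hxeq : x = ((x.toNat : Nat) : Int) := by omega
        have hx2 : PySem.Int.floordiv x 2 = ((x.toNat / 2 : Nat) : Int) := by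
          rw [hxeq]; exact floordiv_two_natCast x.toNat
        have hx2nn : 0 ≤ PySem.Int.floordiv x 2 := by rw [hx2]; positivity
        have hx2lt : (PySem.Int.floordiv x 2).natAbs < fuel := by
          rw [hx2]
          simp only [Int.natAbs_natCast]
          have h1 : 0 < x.natAbs := by omega
          have h2 : x.toNat = x.natAbs := by omega
          omega
        by_cases hgt : (2 : Int) ^ L < k
        · rw [if_pos hgt, ih _ _ hx2nn hx2lt,
              ← f_alt_step_right x k hxpos (hLdef ▸ hgt)]
        · rw [if_neg hgt]
          by_cases hlt : k < (2 : Int) ^ L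
          · rw [if_pos hlt, ih _ _ hx2nn hx2lt,
                ← f_alt_step_left x k hxpos (hLdef ▸ hlt)]
          · rw [if_neg hlt]
            have hke : k = (2 : Int) ^ L := by omega
            rw [hke]
            exact (f_alt_mid x hxpos).symm

-- ===== VERDICT (by name: the statement is the Claim_ definition above) =====
theorem f_spec : Claim_equal_f := by
  intro x k _ hpre
  unfold Spec_f f
  exact fA_eq (x.natAbs + 1) x k hpre (by omega)
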